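-- pv_equiv track=rewrite | github.com/jrbourbeau/ShowerLLH_scripts | support_functions/simfunctions.py | sim2comp
-- ===== SOURCE A (Python) =====
-- def getSimDict():
--
--     # Simulation info for various detector configurations and compositions
--     s = {}
--     s['IT81'] = {'P': ['9166'], 'Fe': ['9165']}
--     s['IT73'] = {}
--     # Note - need to look into the lowE simulation. Appears to be more.
--     s['IT73']['P'] = ['7351', '7006', '7579']
--     s['IT73']['He'] = ['7483', '7241', '7263', '7791']
--     s['IT73']['O'] = ['7486', '7242', '7262', '7851']
--     s['IT73']['Fe'] = ['7394', '7007', '7784']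
--
--     return s
--
-- def sim2comp(sim, full=False, convert=False):
--
--     s = getSimDict()
--     converter = {'P': 'p', 'He': 'h', 'O': 'o', 'Fe': 'f'}
--     if convert:
--         inverted_dict = {v: converter[k]
--                          for k2 in s for k in s[k2] for v in s[k2][k]}
--     else:
--         inverted_dict = {v: k for k2 in s for k in s[k2] for v in s[k2][k]}
--     comp = inverted_dict[sim]
--     fullDict = {'P': 'proton', 'He': 'helium', 'O': 'oxygen', 'Fe': 'iron'}
--     if full:
--         comp = fullDict[comp]
--     return comp
-- ===== SOURCE B (Python) =====
-- def sim2comp(sim, full=False, convert=False):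
--     # Scan the simulation table directly instead of inverting it into a dict.
--     groups = [('P', ['9166']), ('Fe', ['9165']),
--               ('P', ['7351', '7006', '7579']),
--               ('He', ['7483', '7241', '7263', '7791']),
--               ('O', ['7486', '7242', '7262', '7851']),
--               ('Fe', ['7394', '7007', '7784'])]
--     for comp, sims in groups:
--         if sim in sims:
--             break
--     else:
--         raise KeyError(sim)
--     if convert:
--         comp = {'P': 'p', 'He': 'h', 'O': 'o', 'Fe': 'f'}[comp]
--     if full:
--         comp = {'P': 'proton', 'He': 'helium', 'O': 'oxygen', 'Fe': 'iron'}[comp]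
--     return comp
-- ===== Notes on version B (the rewrite author's own statement) =====
-- stated objective: simpler
-- what changed: B scans the composition groups directly for the sim id (first match, break) instead of inverting the whole nested table into a flat dict before a single lookup.
import Mathlib
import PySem

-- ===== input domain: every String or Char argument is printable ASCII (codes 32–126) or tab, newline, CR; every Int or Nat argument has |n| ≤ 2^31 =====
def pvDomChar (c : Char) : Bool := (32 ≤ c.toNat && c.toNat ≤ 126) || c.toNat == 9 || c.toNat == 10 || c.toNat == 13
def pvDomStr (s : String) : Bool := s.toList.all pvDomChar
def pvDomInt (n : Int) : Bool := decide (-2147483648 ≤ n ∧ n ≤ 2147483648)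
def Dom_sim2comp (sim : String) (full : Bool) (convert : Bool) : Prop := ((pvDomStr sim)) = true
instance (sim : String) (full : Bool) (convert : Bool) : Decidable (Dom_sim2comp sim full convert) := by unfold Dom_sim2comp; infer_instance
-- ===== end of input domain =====

-- B scans the composition groups directly for the sim id instead of inverting the whole
-- nested table into a flat dict first (objective: simpler). Equal wherever A returns.

-- ===== PORT A =====
-- getSimDict(): builds the nested dict with the same sequence of assignments.
def pvGetSimDict : PySem.Dict String (PySem.Dict String (List String)) :=
  let s := PySem.Dict.empty
  let s := s.insert "IT81" (((PySem.Dict.empty).insert "P" ["9166"]).insert "Fe" ["9165"])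
  let s := s.insert "IT73" PySem.Dict.empty
  -- s['IT73']['X'] = … : fetch the inner dict, insert, store back (exact: key present)
  let s := s.insert "IT73" ((s.getD "IT73" PySem.Dict.empty).insert "P" ["7351", "7006", "7579"])
  let s := s.insert "IT73" ((s.getD "IT73" PySem.Dict.empty).insert "He" ["7483", "7241", "7263", "7791"])
  let s := s.insert "IT73" ((s.getD "IT73" PySem.Dict.empty).insert "O" ["7486", "7242", "7262", "7851"])
  let s := s.insert "IT73" ((s.getD "IT73" PySem.Dict.empty).insert "Fe" ["7394", "7007", "7784"])
  s

def sim2comp (sim : String) (full : Bool) (convert : Bool) : String :=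
  let s := pvGetSimDict
  let converter : PySem.Dict String String :=
    PySem.Dict.ofList [("P", "p"), ("He", "h"), ("O", "o"), ("Fe", "f")]
  -- the inverted-dict comprehension: fold over configs, comps, sim ids in order
  let inverted : PySem.Dict String String :=
    if convert then
      s.items.foldl (fun d kv =>
        kv.2.items.foldl (fun d kv2 =>
          kv2.2.foldl (fun d v => d.insert v (converter.getD kv2.1 "")) d) d)
        PySem.Dict.empty
    else
      s.items.foldl (fun d kv =>
        kv.2.items.foldl (fun d kv2 =>
          kv2.2.foldl (fun d v => d.insert v kv2.1) d) d)
        PySem.Dict.empty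
  -- inverted_dict[sim]: KeyError when absent — excluded by Pre_sim2comp
  let comp := inverted.getD sim ""
  let fullDict : PySem.Dict String String :=
    PySem.Dict.ofList [("P", "proton"), ("He", "helium"), ("O", "oxygen"), ("Fe", "iron")]
  -- fullDict[comp]: KeyError when full ∧ convert (comp is lowercase) — excluded by Pre_sim2comp
  if full then fullDict.getD comp "" else comp

-- ===== PORT B =====
def pvGroups : List (String × List String) :=
  [("P", ["9166"]), ("Fe", ["9165"]),
   ("P", ["7351", "7006", "7579"]),
   ("He", ["7483", "7241", "7263", "7791"]),
   ("O", ["7486", "7242", "7262", "7851"]),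
   ("Fe", ["7394", "7007", "7784"])]

-- the for/break scan: first group whose sim list contains sim
def pvFindComp (groups : List (String × List String)) (sim : String) : Option String :=
  match groups with
  | [] => none
  | (c, sims) :: rest => if sims.contains sim then some c else pvFindComp rest sim

def sim2comp_alt (sim : String) (full : Bool) (convert : Bool) : String :=
  match pvFindComp pvGroups sim with
  | none => ""  -- KeyError(sim) in Python B — excluded by Pre_sim2comp
  | some comp =>
    let comp := if convert then
      (PySem.Dict.ofList [("P", "p"), ("He", "h"), ("O", "o"), ("Fe", "f")]).getD comp ""
      else comp
    if full then
      -- KeyError when convert also holds — excluded by Pre_sim2comp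
      (PySem.Dict.ofList [("P", "proton"), ("He", "helium"), ("O", "oxygen"), ("Fe", "iron")]).getD comp ""
    else comp

-- ===== PRECONDITION & SPEC =====
-- Pre_ excludes exactly the inputs on which A raises: sim ids outside the table
-- (KeyError from the inverted-dict lookup) and full ∧ convert (KeyError on the
-- lowercase converted letter). B raises KeyError on the same inputs.
def Pre_sim2comp (sim : String) (full : Bool) (convert : Bool) : Prop :=
  sim ∈ ["9166", "9165", "7351", "7006", "7579", "7483", "7241", "7263", "7791",
         "7486", "7242", "7262", "7851", "7394", "7007", "7784"] ∧
  ¬(full = true ∧ convert = true)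
instance (sim : String) (full : Bool) (convert : Bool) : Decidable (Pre_sim2comp sim full convert) := by
  unfold Pre_sim2comp; infer_instance

def pvWitness_sim2comp : String × Bool × Bool := ("7486", true, false)

def Spec_sim2comp (sim : String) (full : Bool) (convert : Bool) (out : String) : Prop := out = sim2comp_alt sim full convert
instance (sim : String) (full : Bool) (convert : Bool) (out : String) : Decidable (Spec_sim2comp sim full convert out) := by unfold Spec_sim2comp; infer_instance

-- ===== CLAIM (what is proved, stated in full; the proofs are below) =====
def Claim_equal_sim2comp : Prop := ∀ (sim : String) (full : Bool) (convert : Bool), Dom_sim2comp sim full convert → Pre_sim2comp sim full convert → Spec_sim2comp sim full convert (sim2comp sim full convert)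

-- ===== LEMMAS AND PROOFS =====

-- ===== VERDICT (by name: the statement is the Claim_ definition above) =====
theorem sim2comp_spec : Claim_equal_sim2comp := by
  intro sim full convert _ hpre
  unfold Spec_sim2comp
  obtain ⟨hmem, hnot⟩ := hpre
  fin_cases hmem <;> cases full <;> cases convert <;>
    first
      | exact absurd ⟨rfl, rfl⟩ hnot
      | decide
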